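-- pv_equiv track=rewrite | github.com/UiHyeon/algorithm_PS | Prgrammers_Lv2_09.py | solution
-- ===== SOURCE A (Python) =====
-- def solution(nums):
--     answer = 0
--
--     choice = int(len(nums) / 2)
--     items = set(nums)
--
--     for num in items:
--         if choice > answer:
--             answer += 1
--
--     return answer
-- ===== SOURCE B (Python) =====
-- def solution(nums):
--     return min(len(nums) // 2, len(set(nums)))
-- ===== Notes on version B (the rewrite author's own statement) =====
-- stated objective: simpler
-- what changed: Replaces the per-element counting loop (which increments until the half-length cap) with the closed form min(len(nums)//2, len(set(nums))).
import Mathlib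
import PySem

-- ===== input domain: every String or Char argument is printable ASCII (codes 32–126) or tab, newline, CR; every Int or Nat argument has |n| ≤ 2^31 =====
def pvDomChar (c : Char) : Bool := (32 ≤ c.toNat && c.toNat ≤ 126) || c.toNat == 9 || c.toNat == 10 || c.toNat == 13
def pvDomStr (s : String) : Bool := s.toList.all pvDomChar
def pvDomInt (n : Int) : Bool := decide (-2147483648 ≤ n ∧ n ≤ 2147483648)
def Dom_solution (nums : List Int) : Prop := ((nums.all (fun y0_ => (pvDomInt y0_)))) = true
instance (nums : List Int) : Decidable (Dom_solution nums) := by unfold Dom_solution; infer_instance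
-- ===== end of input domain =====

-- B replaces A's counting loop over set(nums) with the closed form min(len//2, #distinct); equivalence proved for all inputs.


-- ===== PORT A =====
-- int(len(nums)/2) = len//2 since len ≥ 0; the loop over set(nums) only counts, so its result is iteration-order independent.
def solution (nums : List Int) : Int :=
  let choice : Int := PySem.Int.floordiv (nums.length : Int) 2
  let items : PySem.Set Int := PySem.Set.ofList nums
  items.foldl (fun answer _ => if choice > answer then answer + 1 else answer) 0

-- ===== PORT B =====
def solution_alt (nums : List Int) : Int :=
  min (PySem.Int.floordiv (nums.length : Int) 2) ((PySem.Set.ofList nums).length : Int)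

-- ===== PRECONDITION & SPEC =====
def Spec_solution (nums : List Int) (out : Int) : Prop := out = solution_alt nums
instance (nums : List Int) (out : Int) : Decidable (Spec_solution nums out) := by unfold Spec_solution; infer_instance

-- ===== CLAIM (what is proved, stated in full; the proofs are below) =====
def Claim_equal_solution : Prop := ∀ (nums : List Int), Dom_solution nums → Spec_solution nums (solution nums)

-- ===== LEMMAS AND PROOFS =====
-- A's capped counting loop from accumulator a ≤ c computes min c (a + length).
lemma count_loop_min (c : Int) (s : List Int) :
    ∀ a : Int, a ≤ c →
      s.foldl (fun answer _ => if c > answer then answer + 1 else answer) a = min c (a + s.length) := by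
  induction s with
  | nil => intro a ha; simp [min_eq_right ha]
  | cons x t ih =>
    intro a ha
    simp only [List.foldl_cons]
    by_cases h : c > a
    · rw [if_pos h, ih (a + 1) (by omega)]
      simp [List.length_cons]; omega
    · rw [if_neg h]
      have : a = c := by omega
      subst this
      rw [ih a le_rfl]
      simp [List.length_cons]; omega

lemma floordiv_nonneg (n : Nat) : 0 ≤ PySem.Int.floordiv (n : Int) 2 := by
  simp only [PySem.Int.floordiv, Int.fdiv_eq_ediv]
  exact Int.ediv_nonneg (Int.natCast_nonneg n) (by norm_num : (0:Int) ≤ 2)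

-- ===== VERDICT (by name: the statement is the Claim_ definition above) =====
theorem solution_spec : Claim_equal_solution := by
  intro nums _
  show solution nums = solution_alt nums
  unfold solution solution_alt
  rw [count_loop_min _ _ 0 (floordiv_nonneg _)]
  simp
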